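-- pv_equiv track=rewrite | github.com/dwishnuff/CS587Winter2020 | WB-DataGenerator.py | string4
-- ===== SOURCE A (Python) =====
-- def string4(maxtuples):
--     string4_list = []
--     for i in range(maxtuples):
--         if i % 4 == 0:
--             string4_list.append("AAAA" + ('x' * 48))
--         if i % 4 == 1:
--             string4_list.append("HHHH" + ('x' * 48))
--         if i % 4 == 2:
--             string4_list.append("OOOO" + ('x' * 48))
--         if i % 4 == 3:
--             string4_list.append("VVVV" + ('x' * 48))
--     return string4_list
-- ===== SOURCE B (Python) =====
-- def string4(maxtuples):
--     base = ["AAAA" + 'x' * 48, "HHHH" + 'x' * 48, "OOOO" + 'x' * 48, "VVVV" + 'x' * 48]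
--     n = max(maxtuples, 0)
--     q, r = divmod(n, 4)
--     return base * q + base[:r]
-- ===== Notes on version B (the rewrite author's own statement) =====
-- stated objective: faster
-- what changed: Replaces the per-element loop with four i%4 branches by a closed-form block construction: divmod(n,4) and base*q + base[:r] replicate whole 4-string blocks plus a partial tail.
import Mathlib
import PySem

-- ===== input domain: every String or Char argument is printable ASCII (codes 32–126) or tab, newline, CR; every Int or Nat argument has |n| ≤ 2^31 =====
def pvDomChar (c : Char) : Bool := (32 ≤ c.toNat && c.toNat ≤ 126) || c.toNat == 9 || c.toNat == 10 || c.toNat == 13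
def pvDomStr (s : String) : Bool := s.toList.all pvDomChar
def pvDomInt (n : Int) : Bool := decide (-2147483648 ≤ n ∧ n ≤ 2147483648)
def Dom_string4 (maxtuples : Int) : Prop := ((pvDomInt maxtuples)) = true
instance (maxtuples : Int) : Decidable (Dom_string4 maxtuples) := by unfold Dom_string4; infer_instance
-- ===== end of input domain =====

-- B builds the list from whole replicated 4-blocks plus a partial tail (divmod) instead of A's per-index i%4 branch loop.

-- ===== PORT A =====
-- A's loop body: four successive (non-elif) ifs on i % 4, each appending its constant string.
def string4Step (string4_list : List String) (i : Int) : List String :=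
  let l1 := if PySem.Int.mod i 4 = 0 then string4_list ++ ["AAAAxxxxxxxxxxxxxxxxxxxxxxxxxxxxxxxxxxxxxxxxxxxxxxxx"] else string4_list
  let l2 := if PySem.Int.mod i 4 = 1 then l1 ++ ["HHHHxxxxxxxxxxxxxxxxxxxxxxxxxxxxxxxxxxxxxxxxxxxxxxxx"] else l1
  let l3 := if PySem.Int.mod i 4 = 2 then l2 ++ ["OOOOxxxxxxxxxxxxxxxxxxxxxxxxxxxxxxxxxxxxxxxxxxxxxxxx"] else l2
  if PySem.Int.mod i 4 = 3 then l3 ++ ["VVVVxxxxxxxxxxxxxxxxxxxxxxxxxxxxxxxxxxxxxxxxxxxxxxxx"] else l3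

def string4 (maxtuples : Int) : List String :=
  (PySem.List.pyRange 0 maxtuples 1).foldl string4Step []

-- ===== PORT B =====
def string4Base : List String :=
  ["AAAAxxxxxxxxxxxxxxxxxxxxxxxxxxxxxxxxxxxxxxxxxxxxxxxx",
   "HHHHxxxxxxxxxxxxxxxxxxxxxxxxxxxxxxxxxxxxxxxxxxxxxxxx",
   "OOOOxxxxxxxxxxxxxxxxxxxxxxxxxxxxxxxxxxxxxxxxxxxxxxxx",
   "VVVVxxxxxxxxxxxxxxxxxxxxxxxxxxxxxxxxxxxxxxxxxxxxxxxx"]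

def string4_alt (maxtuples : Int) : List String :=
  let n := max maxtuples 0
  let q := PySem.Int.floordiv n 4
  let r := PySem.Int.mod n 4
  (List.replicate q.toNat string4Base).flatten ++ string4Base.take r.toNat

-- ===== PRECONDITION & SPEC =====
def Spec_string4 (maxtuples : Int) (out : List String) : Prop := out = string4_alt maxtuples
instance (maxtuples : Int) (out : List String) : Decidable (Spec_string4 maxtuples out) := by unfold Spec_string4; infer_instance

-- ===== CLAIM (what is proved, stated in full; the proofs are below) =====
def Claim_equal_string4 : Prop := ∀ (maxtuples : Int), Dom_string4 maxtuples → Spec_string4 maxtuples (string4 maxtuples)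

-- ===== LEMMAS AND PROOFS =====

-- B's closed form, over a Nat count
def string4Blocks (n : Nat) : List String :=
  (List.replicate (n / 4) string4Base).flatten ++ string4Base.take (n % 4)

theorem string4_loop_eq (n : Nat) :
    (PySem.List.pyRange 0 (n : Int) 1).foldl string4Step [] = string4Blocks n := by
  induction n with
  | zero => decide
  | succ n ih =>
    have h1 : ((n : Int) : Int) ≤ ((n+1 : Nat) : Int) := by push_cast; omega
    have : (PySem.List.pyRange 0 ((n+1 : Nat) : Int) 1)
        = PySem.List.pyRange 0 (n : Int) 1 ++ [(n : Int)] := by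
      have := PySem.List.pyRange_one_succ_right (a := 0) (b := (n : Int)) (by exact_mod_cast Int.natCast_nonneg n)
      push_cast
      simpa using this
    rw [this, List.foldl_append, ih]
    simp only [List.foldl]
    -- one step
    have hm : PySem.Int.mod (n : Int) 4 = ((n % 4 : Nat) : Int) := by
      exact_mod_cast PySem.Int.mod_natCast n 4
    have h4 : n % 4 = 0 ∨ n % 4 = 1 ∨ n % 4 = 2 ∨ n % 4 = 3 := by omega
    rcases h4 with h | h | h | h
    · have e : PySem.Int.mod (n : Int) 4 = 0 := by rw [hm, h]; rfl
      have hd : (n+1) / 4 = n / 4 := by omega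
      have hmm : (n+1) % 4 = 1 := by omega
      simp only [string4Step, e]
      norm_num
      simp [string4Blocks, hd, hmm, h, string4Base]
    · have e : PySem.Int.mod (n : Int) 4 = 1 := by rw [hm, h]; rfl
      have hd : (n+1) / 4 = n / 4 := by omega
      have hmm : (n+1) % 4 = 2 := by omega
      simp only [string4Step, e]
      norm_num
      simp [string4Blocks, hd, hmm, h, string4Base]
    · have e : PySem.Int.mod (n : Int) 4 = 2 := by rw [hm, h]; rfl
      have hd : (n+1) / 4 = n / 4 := by omega
      have hmm : (n+1) % 4 = 3 := by omega
      simp only [string4Step, e]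
      norm_num
      simp [string4Blocks, hd, hmm, h, string4Base]
    · have e : PySem.Int.mod (n : Int) 4 = 3 := by rw [hm, h]; rfl
      have hd : (n+1) / 4 = n / 4 + 1 := by omega
      have hmm : (n+1) % 4 = 0 := by omega
      simp only [string4Step, e]
      norm_num
      simp [string4Blocks, hd, hmm, h, string4Base, List.replicate_succ']

-- ===== VERDICT (by name: the statement is the Claim_ definition above) =====
theorem string4_spec : Claim_equal_string4 := by
  intro m _
  unfold Spec_string4 string4 string4_alt
  by_cases h : m ≤ 0
  · rw [PySem.List.pyRange_one_eq_nil h]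
    have hmax : max m 0 = 0 := by omega
    simp [hmax, PySem.Int.floordiv, PySem.Int.mod]
  · rw [not_le] at h
    have hm : m = (m.toNat : Int) := by omega
    have hmax : max m 0 = m := by omega
    have hq : PySem.Int.floordiv ((m.toNat : Int)) 4 = ((m.toNat / 4 : Nat) : Int) := by
      exact_mod_cast PySem.Int.floordiv_natCast m.toNat 4
    have hr : PySem.Int.mod ((m.toNat : Int)) 4 = ((m.toNat % 4 : Nat) : Int) := by
      exact_mod_cast PySem.Int.mod_natCast m.toNat 4
    rw [hmax, hm, string4_loop_eq m.toNat, string4Blocks]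
    simp only [hq, hr, Int.toNat_natCast]
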